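-- pv_equiv track=rewrite | github.com/OlaszPL/Introduction_to_computer_science_course | Kolokwia 2/zad2_kol_popr2_2023.py | roguelike
-- ===== SOURCE A (Python) =====
-- from math import isqrt
--
-- def is_prime(a):
--     if a <= 1:
--         return False
--     if a == 2 or a == 3:
--         return True
--     if a % 2 == 0 or a % 3 == 0:
--         return False
--     i = 5
--     while i <= isqrt(a):
--         if a % i == 0:
--             return False
--         i += 2
--         if a % i == 0:
--             return False
--         i += 4
--
--     return True
--
-- def roguelike(T):
--     n = len(T)
--
--     def rek(i = 0, backpack = 0):
--         if i == n:
--             return True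
--
--         elif i != n - 1:
--
--             for j in range(0, 6 - backpack + 1):
--                 if T[i] - j >= 2:
--                     if is_prime(T[i] - j):
--                         if rek(i + 1, backpack + j):
--                             return True
--
--             for k in range(0, backpack + 1):
--                 if T[i] + k <= 97:
--                     if is_prime(T[i] + k):
--                         if rek(i + 1, backpack - k):
--                             return True
--
--         elif is_prime(T[i] + backpack): # musimy wszystkie
--             return True
--
--         return False
--
--     return rek()
-- ===== SOURCE B (Python) =====
-- from math import isqrt
--
-- def is_prime(a):
--     if a <= 1:
--         return False
--     if a == 2 or a == 3:
--         return True
--     if a % 2 == 0 or a % 3 == 0: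
--         return False
--     i = 5
--     while i <= isqrt(a):
--         if a % i == 0:
--             return False
--         i += 2
--         if a % i == 0:
--             return False
--         i += 4
--
--     return True
--
-- def roguelike(T):
--     # Forward DP: one pass maintaining the set of reachable backpack loads
--     # (always within 0..6), instead of A's top-down backtracking recursion.
--     if not T:
--         return True
--     states = {0}
--     for x in T[:-1]:
--         nxt = set()
--         for b in states:
--             for j in range(0, 7 - b):
--                 if x - j >= 2 and is_prime(x - j):
--                     nxt.add(b + j)
--             for k in range(0, b + 1):
--                 if x + k <= 97 and is_prime(x + k):
--                     nxt.add(b - k)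
--         states = nxt
--     return any(is_prime(T[-1] + b) for b in states)
-- ===== Notes on version B (the rewrite author's own statement) =====
-- stated objective: alternative
-- what changed: Replaces A's top-down backtracking recursion over (index, backpack) choices by a single forward pass maintaining the set of reachable backpack loads (always within 0..6), i.e. bottom-up DP instead of depth-first search.
import Mathlib
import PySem

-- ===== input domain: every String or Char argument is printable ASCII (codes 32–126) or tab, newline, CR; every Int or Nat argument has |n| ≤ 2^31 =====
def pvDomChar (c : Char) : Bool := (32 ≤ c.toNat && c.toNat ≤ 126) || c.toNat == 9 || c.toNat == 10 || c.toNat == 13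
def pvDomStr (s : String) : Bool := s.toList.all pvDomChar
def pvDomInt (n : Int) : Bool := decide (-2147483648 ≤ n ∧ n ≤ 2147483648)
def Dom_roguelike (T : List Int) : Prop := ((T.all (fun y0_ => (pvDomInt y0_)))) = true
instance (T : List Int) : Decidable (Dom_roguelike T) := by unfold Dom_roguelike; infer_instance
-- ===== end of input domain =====

-- B replaces A's top-down backtracking recursion by a single forward pass
-- maintaining the set of reachable backpack loads (objective: alternative).

-- ===== PORT A =====
-- math.isqrt(a) for a ≥ 0 (is_prime only reaches it with a ≥ 5)
def pvIsqrt (a : Int) : Int := (Nat.sqrt a.toNat : Int)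

-- the 6k±1 trial-division while-loop of is_prime; fuel bounds the iterations
-- (i starts at 5 and grows by 6 each round, so sqrt+1 rounds always suffice)
def pvPrimeLoop (a : Int) : Nat → Int → Bool
  | 0, _ => true
  | fuel + 1, i =>
      if i ≤ pvIsqrt a then
        if PySem.Int.mod a i == 0 then false
        else if PySem.Int.mod a (i + 2) == 0 then false
        else pvPrimeLoop a fuel (i + 6)
      else true

-- is_prime from the Python module (identical helper in A and B)
def isPrime (a : Int) : Bool :=
  if a ≤ 1 then false
  else if a == 2 || a == 3 then true
  else if PySem.Int.mod a 2 == 0 || PySem.Int.mod a 3 == 0 then false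
  else pvPrimeLoop a (Nat.sqrt a.toNat + 1) 5

-- A's rek(i, backpack): recursion on the suffix T[i:], branches in A's order;
-- List.any short-circuits exactly like A's for-loops with early 'return True'
def rek : List Int → Int → Bool
  | [], _ => true
  | [x], b => isPrime (x + b)
  | x :: rest, b =>
      ((PySem.List.pyRange 0 (6 - b + 1) 1).any fun j =>
        decide (x - j ≥ 2) && (isPrime (x - j) && rek rest (b + j))) ||
      ((PySem.List.pyRange 0 (b + 1) 1).any fun k =>
        decide (x + k ≤ 97) && (isPrime (x + k) && rek rest (b - k)))

def roguelike (T : List Int) : Bool := rek T 0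

-- ===== PORT B =====
-- one step of B's DP: all backpack loads reachable after handling x from a load in S
def stepSet (x : Int) (S : PySem.Set Int) : PySem.Set Int :=
  S.foldl (fun nxt b =>
    let nxt := (PySem.List.pyRange 0 (7 - b) 1).foldl
      (fun nxt j => if decide (x - j ≥ 2) && isPrime (x - j)
                    then PySem.Set.add nxt (b + j) else nxt) nxt
    (PySem.List.pyRange 0 (b + 1) 1).foldl
      (fun nxt k => if decide (x + k ≤ 97) && isPrime (x + k)
                    then PySem.Set.add nxt (b - k) else nxt) nxt)
    PySem.Set.empty

def roguelike_alt (T : List Int) : Bool :=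
  match T with
  | [] => true
  | _ :: _ =>
      -- T[:-1] is T.dropLast; T[-1] is pyGetD T (-1) (in range: T ≠ [])
      let states := T.dropLast.foldl (fun S x => stepSet x S) (PySem.Set.ofList [0])
      states.any fun b => isPrime (PySem.List.pyGetD T (-1) 0 + b)

-- ===== PRECONDITION & SPEC =====
def Spec_roguelike (T : List Int) (out : Bool) : Prop := out = roguelike_alt T
instance (T : List Int) (out : Bool) : Decidable (Spec_roguelike T out) := by unfold Spec_roguelike; infer_instance

-- ===== CLAIM (what is proved, stated in full; the proofs are below) =====
def Claim_equal_roguelike : Prop := ∀ (T : List Int), Dom_roguelike T → Spec_roguelike T (roguelike T)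

-- ===== LEMMAS AND PROOFS =====

-- the backpack loads reachable from load b when handling element x, as a plain list
def movesList (x b : Int) : List Int :=
  ((PySem.List.pyRange 0 (6 - b + 1) 1).filter
      (fun j => decide (x - j ≥ 2) && isPrime (x - j))).map (fun j => b + j) ++
  ((PySem.List.pyRange 0 (b + 1) 1).filter
      (fun k => decide (x + k ≤ 97) && isPrime (x + k))).map (fun k => b - k)

lemma rek_cons (x : Int) (rest : List Int) (hne : rest ≠ []) (b : Int) :
    rek (x :: rest) b = (movesList x b).any (fun c => rek rest c) := by
  obtain ⟨y, ys, rfl⟩ := List.exists_cons_of_ne_nil hne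
  simp [rek, movesList, List.any_append, List.any_map, List.any_filter,
    Function.comp, Bool.and_assoc]

lemma mem_foldl_addIf (p : Int → Bool) (f : Int → Int) :
    ∀ (L : List Int) (acc : PySem.Set Int) (c : Int),
      c ∈ L.foldl (fun a j => if p j then PySem.Set.add a (f j) else a) acc ↔
        c ∈ acc ∨ ∃ j ∈ L, p j = true ∧ c = f j := by
  intro L
  induction L with
  | nil => simp
  | cons j L ih =>
      intro acc c
      simp only [List.foldl_cons, ih, List.mem_cons]
      by_cases hp : p j = true
      · simp only [hp, if_true, PySem.Set.mem_add]
        aesop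
      · simp only [Bool.not_eq_true] at hp
        simp [hp]

lemma mem_inner (x b c : Int) (acc : PySem.Set Int) :
    c ∈ (PySem.List.pyRange 0 (b + 1) 1).foldl
          (fun nxt k => if decide (x + k ≤ 97) && isPrime (x + k)
                        then PySem.Set.add nxt (b - k) else nxt)
          ((PySem.List.pyRange 0 (7 - b) 1).foldl
            (fun nxt j => if decide (x - j ≥ 2) && isPrime (x - j)
                          then PySem.Set.add nxt (b + j) else nxt) acc) ↔
      c ∈ acc ∨ c ∈ movesList x b := by
  rw [mem_foldl_addIf, mem_foldl_addIf]
  have hr : (7 - b : Int) = 6 - b + 1 := by ring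
  rw [hr]
  simp only [movesList, List.mem_append, List.mem_map, List.mem_filter]
  aesop

lemma mem_stepSet (x c : Int) (S : PySem.Set Int) :
    c ∈ stepSet x S ↔ ∃ b ∈ S, c ∈ movesList x b := by
  unfold stepSet
  suffices h : ∀ (L : List Int) (acc : PySem.Set Int),
      c ∈ L.foldl (fun nxt b =>
        (PySem.List.pyRange 0 (b + 1) 1).foldl
          (fun nxt k => if decide (x + k ≤ 97) && isPrime (x + k)
                        then PySem.Set.add nxt (b - k) else nxt)
          ((PySem.List.pyRange 0 (7 - b) 1).foldl
            (fun nxt j => if decide (x - j ≥ 2) && isPrime (x - j)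
                          then PySem.Set.add nxt (b + j) else nxt) nxt)) acc ↔
        c ∈ acc ∨ ∃ b ∈ L, c ∈ movesList x b by
    have := h S PySem.Set.empty
    simpa [PySem.Set.empty] using this
  intro L
  induction L with
  | nil => simp
  | cons b L ih =>
      intro acc
      simp only [List.foldl_cons, ih, List.mem_cons]
      rw [mem_inner]
      aesop

lemma any_stepSet (x : Int) (S : PySem.Set Int) (P : Int → Bool) :
    (stepSet x S).any P = S.any (fun b => (movesList x b).any P) := by
  rcases h : (stepSet x S).any P with _ | _
  · symm
    rw [Bool.eq_false_iff]
    intro hc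
    rw [List.any_eq_true] at hc
    obtain ⟨b, hb, hbP⟩ := hc
    rw [List.any_eq_true] at hbP
    obtain ⟨cc, hcc, hP⟩ := hbP
    have : (stepSet x S).any P = true :=
      List.any_eq_true.mpr ⟨cc, (mem_stepSet x cc S).mpr ⟨b, hb, hcc⟩, hP⟩
    simp [h] at this
  · symm
    rw [List.any_eq_true] at h ⊢
    obtain ⟨cc, hcc, hP⟩ := h
    obtain ⟨b, hb, hm⟩ := (mem_stepSet x cc S).mp hcc
    exact ⟨b, hb, List.any_eq_true.mpr ⟨cc, hm, hP⟩⟩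

lemma foldl_any_eq_rek (l : List Int) (last : Int) :
    ∀ (S : PySem.Set Int),
      ((l.foldl (fun S x => stepSet x S) S).any fun b => isPrime (last + b)) =
        S.any (fun b => rek (l ++ [last]) b) := by
  induction l with
  | nil =>
      intro S
      simp [rek]
  | cons x l ih =>
      intro S
      simp only [List.foldl_cons, List.cons_append]
      rw [ih]
      rw [any_stepSet]
      exact PySem.List.any_congr_mem
        (fun b _ => (rek_cons x (l ++ [last]) (by simp) b).symm)

-- ===== VERDICT (by name: the statement is the Claim_ definition above) =====
theorem roguelike_spec : Claim_equal_roguelike := by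
  intro T _
  unfold Spec_roguelike roguelike roguelike_alt
  match T with
  | [] => rfl
  | x :: xs =>
      obtain ⟨ys, z, hconcat⟩ : ∃ ys z, x :: xs = ys ++ [z] := by
        rcases List.eq_nil_or_concat' (x :: xs) with h | ⟨ys, z, h⟩
        · simp at h
        · exact ⟨ys, z, h⟩
      simp only [hconcat, List.dropLast_concat,
        PySem.List.pyGetD_neg_one_append_singleton]
      rw [foldl_any_eq_rek]
      simp [PySem.Set.ofList]
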